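-- pv_equiv track=rewrite | github.com/sgttomas/chirality-piping | tools/drawing_extract/flag_duplicate_equipment_csv.py | classify_duplicate
-- ===== SOURCE A (Python) =====
-- def classify_duplicate(records: list[dict[str, str]]) -> str:
--     names = {((r.get("equipment_name") or "").strip()) for r in records}
--     drawings = {((r.get("drawing") or "").strip()) for r in records}
--     if len(names) == 1 and len(drawings) == 1:
--         return "EXACT_REPEAT"
--     if len(names) > 1 and len(drawings) == 1:
--         return "NAME_CONFLICT"
--     if len(names) == 1 and len(drawings) > 1:
--         return "DRAWING_CONFLICT"
--     return "NAME_AND_DRAWING_CONFLICT"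
-- ===== SOURCE B (Python) =====
-- _VERDICT = {
--     (False, False): "EXACT_REPEAT",
--     (True, False): "NAME_CONFLICT",
--     (False, True): "DRAWING_CONFLICT",
--     (True, True): "NAME_AND_DRAWING_CONFLICT",
-- }
--
--
-- def _norm(r, field):
--     return (r.get(field) or "").strip()
--
--
-- def classify_duplicate(records: list[dict[str, str]]) -> str:
--     if not records:
--         return "NAME_AND_DRAWING_CONFLICT"
--     first, rest = records[0], records[1:]
--     n0 = _norm(first, "equipment_name")
--     d0 = _norm(first, "drawing")
--     # one fused pass with a conflict-state accumulator; stops once saturated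
--     nc = dc = False
--     for r in rest:
--         nc = nc or _norm(r, "equipment_name") != n0
--         dc = dc or _norm(r, "drawing") != d0
--         if nc and dc:
--             break
--     return _VERDICT[(nc, dc)]
-- ===== Notes on version B (the rewrite author's own statement) =====
-- stated objective: alternative
-- what changed: Instead of materialising two deduplicated sets and classifying by their sizes through an if-chain, B makes one fused pass carrying a two-bit conflict-state accumulator (name/drawing deviates from the first record) that exits early once saturated, and dispatches the verdict through a lookup table.
import Mathlib
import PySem

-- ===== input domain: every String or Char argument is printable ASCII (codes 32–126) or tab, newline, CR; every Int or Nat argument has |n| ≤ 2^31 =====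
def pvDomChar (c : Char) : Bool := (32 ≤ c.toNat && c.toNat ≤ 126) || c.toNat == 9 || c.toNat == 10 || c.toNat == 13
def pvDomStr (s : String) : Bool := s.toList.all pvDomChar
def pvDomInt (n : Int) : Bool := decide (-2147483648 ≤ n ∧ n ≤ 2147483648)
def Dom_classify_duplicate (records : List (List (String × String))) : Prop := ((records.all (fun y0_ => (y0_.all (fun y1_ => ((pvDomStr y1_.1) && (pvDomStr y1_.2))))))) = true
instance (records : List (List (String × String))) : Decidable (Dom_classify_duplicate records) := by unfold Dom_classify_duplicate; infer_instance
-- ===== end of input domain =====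

-- B replaces A's two deduplicated sets (classified by size through an if-chain) with one fused
-- early-exiting pass over the tail carrying a two-bit conflict accumulator, dispatched through a
-- verdict table; objective: alternative (same cost, different structure).

-- shared normalization, the Python expression (r.get(field) or "").strip() in both programs
def pvNorm (r : List (String × String)) (field : String) : String :=
  PySem.Str.strip (((PySem.Dict.mk r).get? field).getD "")

-- ===== PORT A =====
def classify_duplicate (records : List (List (String × String))) : String :=
  let names : PySem.Set String :=
    PySem.Set.ofList (records.map (fun r => pvNorm r "equipment_name"))
  let drawings : PySem.Set String :=
    PySem.Set.ofList (records.map (fun r => pvNorm r "drawing"))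
  if PySem.Set.len names = 1 ∧ PySem.Set.len drawings = 1 then "EXACT_REPEAT"
  else if PySem.Set.len names > 1 ∧ PySem.Set.len drawings = 1 then "NAME_CONFLICT"
  else if PySem.Set.len names = 1 ∧ PySem.Set.len drawings > 1 then "DRAWING_CONFLICT"
  else "NAME_AND_DRAWING_CONFLICT"

-- ===== PORT B =====
-- the _VERDICT table of Source B
def pvVerdict : Bool × Bool → String
  | (false, false) => "EXACT_REPEAT"
  | (true, false) => "NAME_CONFLICT"
  | (false, true) => "DRAWING_CONFLICT"
  | (true, true) => "NAME_AND_DRAWING_CONFLICT"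

-- Source B's fused loop over the tail: conflict-state accumulator, early exit when saturated
def pvScan (n0 d0 : String) (nc dc : Bool) : List (List (String × String)) → Bool × Bool
  | [] => (nc, dc)
  | r :: t =>
    let nc' := nc || (pvNorm r "equipment_name" != n0)
    let dc' := dc || (pvNorm r "drawing" != d0)
    if nc' && dc' then (nc', dc') else pvScan n0 d0 nc' dc' t

def classify_duplicate_alt (records : List (List (String × String))) : String :=
  match records with
  | [] => "NAME_AND_DRAWING_CONFLICT"
  | first :: rest =>
    let n0 := pvNorm first "equipment_name"
    let d0 := pvNorm first "drawing"
    pvVerdict (pvScan n0 d0 false false rest)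

-- ===== PRECONDITION & SPEC =====
def Spec_classify_duplicate (records : List (List (String × String))) (out : String) : Prop := out = classify_duplicate_alt records
instance (records : List (List (String × String))) (out : String) : Decidable (Spec_classify_duplicate records out) := by unfold Spec_classify_duplicate; infer_instance

-- ===== CLAIM (what is proved, stated in full; the proofs are below) =====
def Claim_equal_classify_duplicate : Prop := ∀ (records : List (List (String × String))), Dom_classify_duplicate records → Spec_classify_duplicate records (classify_duplicate records)

-- ===== LEMMAS AND PROOFS =====

theorem length_le_foldl_add {α : Type} [BEq α] (l : List α) (s : List α) :
    s.length ≤ (List.foldl PySem.Set.add s l).length := by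
  induction l generalizing s with
  | nil => simp
  | cons y t ih =>
    refine le_trans ?_ (ih (PySem.Set.add s y))
    simp [PySem.Set.add]
    split <;> simp

theorem foldl_add_singleton_len_one {α : Type} [BEq α] [LawfulBEq α] (x : α) (l : List α) :
    (List.foldl PySem.Set.add [x] l).length = 1 ↔ l.all (fun y => y == x) = true := by
  induction l with
  | nil => simp
  | cons y t ih =>
    by_cases hyx : y = x
    · subst hyx
      have : PySem.Set.add [y] y = [y] := by simp [PySem.Set.add]
      simp [List.foldl_cons, ih]
    · have hadd : PySem.Set.add [x] y = [x, y] := by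
        simp [PySem.Set.add, PySem.Set.contains]
        exact fun h => hyx h
      have hge : 2 ≤ (List.foldl PySem.Set.add [x, y] t).length := by
        simpa using length_le_foldl_add t [x, y]
      constructor
      · intro h
        rw [List.foldl_cons, hadd] at h
        omega
      · intro h
        simp at h
        exact absurd h.1 hyx

theorem ofList_cons {α : Type} [BEq α] (x : α) (l : List α) :
    PySem.Set.ofList (x :: l) = List.foldl PySem.Set.add [x] l := by
  simp [PySem.Set.ofList_eq_foldl, PySem.Set.add, PySem.Set.contains]

theorem set_len_one_iff (f : List (String × String) → String)
    (first : List (String × String)) (rest : List (List (String × String))) :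
    PySem.Set.len (PySem.Set.ofList ((first :: rest).map f)) = 1 ↔
      rest.all (fun r => f r == f first) = true := by
  rw [List.map_cons, ofList_cons]
  simp only [PySem.Set.len]
  rw [show (1:Int) = ((1:Nat):Int) from rfl, Nat.cast_inj,
    foldl_add_singleton_len_one, List.all_map]
  simp [Function.comp]

theorem set_len_pos (f : List (String × String) → String)
    (first : List (String × String)) (rest : List (List (String × String))) :
    1 ≤ PySem.Set.len (PySem.Set.ofList ((first :: rest).map f)) := by
  rw [List.map_cons, ofList_cons]
  simp only [PySem.Set.len]
  exact_mod_cast length_le_foldl_add (rest.map f) [f first]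

-- the early-exiting scan computes the same pair as the full 'any' over the tail
theorem pvScan_eq_any (n0 d0 : String) (nc dc : Bool) (l : List (List (String × String))) :
    pvScan n0 d0 nc dc l =
      (nc || l.any (fun r => pvNorm r "equipment_name" != n0),
       dc || l.any (fun r => pvNorm r "drawing" != d0)) := by
  induction l generalizing nc dc with
  | nil => simp [pvScan]
  | cons r t ih =>
    simp only [pvScan, List.any_cons]
    split
    · rename_i h
      simp only [Bool.and_eq_true] at h
      obtain ⟨h1, h2⟩ := h
      simp [← Bool.or_assoc, h1, h2]
    · rw [ih]
      simp [Bool.or_assoc]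

-- ===== VERDICT (by name: the statement is the Claim_ definition above) =====
theorem classify_duplicate_spec : Claim_equal_classify_duplicate := by
  intro records _
  unfold Spec_classify_duplicate
  cases records with
  | nil => rfl
  | cons first rest =>
    show classify_duplicate (first :: rest) = classify_duplicate_alt (first :: rest)
    simp only [classify_duplicate, classify_duplicate_alt, pvScan_eq_any]
    have hn := set_len_one_iff (fun r => pvNorm r "equipment_name") first rest
    have hd := set_len_one_iff (fun r => pvNorm r "drawing") first rest
    have hnp := set_len_pos (fun r => pvNorm r "equipment_name") first rest
    have hdp := set_len_pos (fun r => pvNorm r "drawing") first rest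
    simp only [Bool.false_or]
    by_cases h1 : (rest.any (fun r => pvNorm r "equipment_name" != pvNorm first "equipment_name")) = true <;>
      by_cases h2 : (rest.any (fun r => pvNorm r "drawing" != pvNorm first "drawing")) = true
    · -- both conflict
      have hn1 : ¬ PySem.Set.len (PySem.Set.ofList ((first :: rest).map (fun r => pvNorm r "equipment_name"))) = 1 := by
        rw [hn]; simp only [List.any_eq_true, bne_iff_ne] at h1
        obtain ⟨x, hx, hne⟩ := h1
        simp only [List.all_eq_true, beq_iff_eq]
        exact fun hall => hne (hall x hx)
      have hd1 : ¬ PySem.Set.len (PySem.Set.ofList ((first :: rest).map (fun r => pvNorm r "drawing"))) = 1 := by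
        rw [hd]; simp only [List.any_eq_true, bne_iff_ne] at h2
        obtain ⟨x, hx, hne⟩ := h2
        simp only [List.all_eq_true, beq_iff_eq]
        exact fun hall => hne (hall x hx)
      rw [h1, h2]
      simp only [pvVerdict]
      rw [if_neg (fun h => hn1 h.1), if_neg (fun h => hd1 h.2), if_neg (fun h => hn1 h.1)]
    · -- name conflict only
      have hall2 : (rest.all (fun r => pvNorm r "drawing" == pvNorm first "drawing")) = true := by
        simp only [List.any_eq_true, bne_iff_ne, not_exists, not_and, not_ne_iff] at h2
        simp only [List.all_eq_true, beq_iff_eq]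
        exact fun x hx => h2 x hx
      have hn1 : ¬ PySem.Set.len (PySem.Set.ofList ((first :: rest).map (fun r => pvNorm r "equipment_name"))) = 1 := by
        rw [hn]; simp only [List.any_eq_true, bne_iff_ne] at h1
        obtain ⟨x, hx, hne⟩ := h1
        simp only [List.all_eq_true, beq_iff_eq]
        exact fun hall => hne (hall x hx)
      rw [Bool.not_eq_true] at h2
      rw [h1, h2]
      simp only [pvVerdict]
      rw [if_neg (fun h => hn1 h.1), if_pos ⟨lt_of_le_of_ne hnp (fun h => hn1 h.symm), hd.mpr hall2⟩]
    · -- drawing conflict only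
      have hall1 : (rest.all (fun r => pvNorm r "equipment_name" == pvNorm first "equipment_name")) = true := by
        simp only [List.any_eq_true, bne_iff_ne, not_exists, not_and, not_ne_iff] at h1
        simp only [List.all_eq_true, beq_iff_eq]
        exact fun x hx => h1 x hx
      have hd1 : ¬ PySem.Set.len (PySem.Set.ofList ((first :: rest).map (fun r => pvNorm r "drawing"))) = 1 := by
        rw [hd]; simp only [List.any_eq_true, bne_iff_ne] at h2
        obtain ⟨x, hx, hne⟩ := h2
        simp only [List.all_eq_true, beq_iff_eq]
        exact fun hall => hne (hall x hx)
      rw [Bool.not_eq_true] at h1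
      rw [h1, h2]
      simp only [pvVerdict]
      rw [if_neg (fun h => hd1 h.2), if_neg (fun h => hd1 h.2),
        if_pos ⟨hn.mpr hall1, lt_of_le_of_ne hdp (fun h => hd1 h.symm)⟩]
    · -- no conflict
      have hall1 : (rest.all (fun r => pvNorm r "equipment_name" == pvNorm first "equipment_name")) = true := by
        simp only [List.any_eq_true, bne_iff_ne, not_exists, not_and, not_ne_iff] at h1
        simp only [List.all_eq_true, beq_iff_eq]
        exact fun x hx => h1 x hx
      have hall2 : (rest.all (fun r => pvNorm r "drawing" == pvNorm first "drawing")) = true := by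
        simp only [List.any_eq_true, bne_iff_ne, not_exists, not_and, not_ne_iff] at h2
        simp only [List.all_eq_true, beq_iff_eq]
        exact fun x hx => h2 x hx
      rw [Bool.not_eq_true] at h1 h2
      rw [h1, h2]
      simp only [pvVerdict]
      rw [if_pos ⟨hn.mpr hall1, hd.mpr hall2⟩]
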